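-- pv_equiv track=rewrite | github.com/finitefield-org/mask-pii | python/src/mask_pii/masker.py | _mask_phones_in_text
-- ===== SOURCE A (Python) =====
-- def _mask_phones_in_text(input_text: str, mask_char: str) -> str:
--     length = len(input_text)
--     output: list[str] = []
--     last = 0
--     i = 0
--
--     while i < length:
--         if _is_phone_start(input_text[i]):
--             end = i
--             while end < length and _is_phone_char(input_text[end]):
--                 end += 1
--
--             digit_count = 0
--             last_digit_index = -1
--             for idx in range(i, end):
--                 if _is_digit(input_text[idx]):
--                     digit_count += 1
--                     last_digit_index = idx
--
--             if last_digit_index != -1: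
--                 candidate_end = last_digit_index + 1
--                 if digit_count >= 5:
--                     candidate = input_text[i:candidate_end]
--                     output.append(input_text[last:i])
--                     output.append(_mask_phone_candidate(candidate, mask_char))
--                     last = candidate_end
--                     i = candidate_end
--                     continue
--
--             i = end
--             continue
--         i += 1
--
--     output.append(input_text[last:])
--     return "".join(output)
--
-- def _mask_phone_candidate(candidate: str, mask_char: str) -> str:
--     digit_count = sum(1 for ch in candidate if _is_digit(ch))
--     current_index = 0
--     result_chars: list[str] = []
--
--     for ch in candidate:
--         if _is_digit(ch):
--             current_index += 1
--             if digit_count > 4 and current_index <= digit_count - 4: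
--                 result_chars.append(mask_char)
--             else:
--                 result_chars.append(ch)
--         else:
--             result_chars.append(ch)
--
--     return "".join(result_chars)
--
-- def _is_phone_start(ch: str) -> bool:
--     return _is_digit(ch) or ch in {"+", "("}
--
-- def _is_phone_char(ch: str) -> bool:
--     return _is_digit(ch) or ch in {" ", "-", "(", ")", "+"}
--
-- def _is_digit(ch: str) -> bool:
--     return "0" <= ch <= "9"
-- ===== SOURCE B (Python) =====
-- def _mask_phones_in_text(input_text: str, mask_char: str) -> str:
--     # One right-to-left pass: a digit is masked exactly when at least four
--     # digits follow it inside the same maximal run of phone characters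
--     # (digits, space, '-', '(', ')', '+'), so no run extraction or per-run
--     # digit counting is needed.
--     out: list[str] = []
--     k = 0  # digits seen so far (from the right) in the current run
--     for c in reversed(input_text):
--         if "0" <= c <= "9":
--             out.append(mask_char if k >= 4 else c)
--             k += 1
--         elif c in " -()+":
--             out.append(c)
--         else:
--             k = 0
--             out.append(c)
--     out.reverse()
--     return "".join(out)
-- ===== Notes on version B (the rewrite author's own statement) =====
-- stated objective: alternative
-- what changed: A's forward scanner that extracts phone-run candidates (start-char detection, last/candidate-end/last-digit-index bookkeeping, a digit-counting pass over each candidate and a second masking pass) is replaced by one right-to-left pass with a single saturating counter: a digit is masked exactly when at least four digits follow it in the same run of phone characters, so no run extraction, slicing or per-run digit counting happens (constant-factor win from the single pass).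
import Mathlib
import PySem

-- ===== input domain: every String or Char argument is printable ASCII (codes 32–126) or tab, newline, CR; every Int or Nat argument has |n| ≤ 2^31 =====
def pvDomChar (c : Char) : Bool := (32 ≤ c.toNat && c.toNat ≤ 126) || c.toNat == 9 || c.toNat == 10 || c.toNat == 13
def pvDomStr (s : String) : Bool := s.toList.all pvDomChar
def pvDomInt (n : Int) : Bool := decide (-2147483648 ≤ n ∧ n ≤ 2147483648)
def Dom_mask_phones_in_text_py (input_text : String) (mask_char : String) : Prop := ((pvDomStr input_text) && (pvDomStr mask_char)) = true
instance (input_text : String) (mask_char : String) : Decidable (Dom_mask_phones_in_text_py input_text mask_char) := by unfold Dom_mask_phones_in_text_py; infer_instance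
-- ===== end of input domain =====

-- B replaces A's forward candidate scanner (start detection, last-digit bookkeeping, per-candidate
-- digit count + masking pass) by one right-to-left pass with a saturating counter: a digit is
-- masked exactly when at least four digits follow it in the same phone-character run
-- (objective: alternative; same asymptotic cost).

-- ===== PORT A =====
def pvIsDigit (c : Char) : Bool := '0' ≤ c && c ≤ '9'
def pvIsStart (c : Char) : Bool := pvIsDigit c || c == '+' || c == '('
def pvIsPhone (c : Char) : Bool := pvIsDigit c || c == ' ' || c == '-' || c == '(' || c == ')' || c == '+'

-- inner while: end advances over phone chars
def pvScanEnd (s : List Char) (e : Nat) : Nat :=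
  if h : e < s.length then
    if pvIsPhone s[e] then pvScanEnd s (e+1) else e
  else e
termination_by s.length - e
decreasing_by omega

-- the for-loop counting digits and tracking the last digit index
-- (the remaining iteration count fin - idx is the structural counter)
def pvCountLastGo (s : List Char) (k : Nat) (idx : Nat) (dc : Nat) (ldi : Int) : Nat × Int :=
  match k with
  | 0 => (dc, ldi)
  | k+1 =>
    if pvIsDigit (s.getD idx ' ') then pvCountLastGo s k (idx+1) (dc+1) idx
    else pvCountLastGo s k (idx+1) dc ldi

def pvCountLast (s : List Char) (idx fin : Nat) (dc : Nat) (ldi : Int) : Nat × Int :=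
  pvCountLastGo s (fin - idx) idx dc ldi

def pvMaskAGo (l : List Char) (mask : List Char) (dc cur : Nat) : List Char :=
  match l with
  | [] => []
  | ch :: r =>
    if pvIsDigit ch then
      (if dc > 4 && cur + 1 ≤ dc - 4 then mask else [ch]) ++ pvMaskAGo r mask dc (cur+1)
    else ch :: pvMaskAGo r mask dc cur

def pvMaskA (cand : List Char) (mask : List Char) : List Char :=
  pvMaskAGo cand mask ((cand.filter pvIsDigit).length) 0

-- the while loop (index i strictly increases each iteration, so s.length
-- steps of fuel make the guarded recursion structural and exact)
def pvLoopAGo (fuel : Nat) (s : List Char) (mask : List Char) (i last : Nat)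
    (out : List Char) : List Char :=
  match fuel with
  | 0 => out ++ s.drop last
  | fuel+1 =>
    if h : i < s.length then
      if pvIsStart s[i] then
        let e := pvScanEnd s i
        let r := pvCountLast s i e 0 (-1)
        if r.2 ≠ -1 ∧ r.1 ≥ 5 then
          let ce := (r.2 + 1).toNat
          pvLoopAGo fuel s mask ce ce
            (out ++ (s.drop last).take (i - last) ++ pvMaskA ((s.drop i).take (ce - i)) mask)
        else pvLoopAGo fuel s mask e last out
      else pvLoopAGo fuel s mask (i+1) last out
    else out ++ s.drop last

def mask_phones_in_text_py (input_text : String) (mask_char : String) : String :=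
  String.ofList (pvLoopAGo input_text.toList.length input_text.toList mask_char.toList 0 0 [])

-- ===== PORT B =====
-- iteration over reversed(input_text), appending one chunk (mask_char or the char) per step;
-- k counts digits seen so far in the current phone run
def pvRevGo (mask : List Char) : List Char → Nat → List (List Char)
  | [], _ => []
  | c :: r, k =>
    if '0' ≤ c && c ≤ '9' then
      (if k ≥ 4 then mask else [c]) :: pvRevGo mask r (k+1)
    else if c == ' ' || c == '-' || c == '(' || c == ')' || c == '+' then
      [c] :: pvRevGo mask r k
    else
      [c] :: pvRevGo mask r 0

-- out.reverse(); "".join(out)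
def mask_phones_in_text_py_alt (input_text : String) (mask_char : String) : String :=
  String.ofList ((pvRevGo mask_char.toList input_text.toList.reverse 0).reverse.flatten)

-- ===== PRECONDITION & SPEC =====
def Spec_mask_phones_in_text_py (input_text : String) (mask_char : String) (out : String) : Prop := out = mask_phones_in_text_py_alt input_text mask_char
instance (input_text : String) (mask_char : String) (out : String) : Decidable (Spec_mask_phones_in_text_py input_text mask_char out) := by unfold Spec_mask_phones_in_text_py; infer_instance

-- ===== CLAIM (what is proved, stated in full; the proofs are below) =====
def Claim_equal_mask_phones_in_text_py : Prop := ∀ (input_text : String) (mask_char : String), Dom_mask_phones_in_text_py input_text mask_char → Spec_mask_phones_in_text_py input_text mask_char (mask_phones_in_text_py input_text mask_char)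

-- ===== LEMMAS AND PROOFS =====

theorem pvIsPhone_of_start {c : Char} (h : pvIsStart c = true) : pvIsPhone c = true := by
  simp [pvIsStart, pvIsPhone] at *; tauto

-- digit count of a list
def pvCdg (l : List Char) : Nat := (l.filter pvIsDigit).length

-- the prefix of l up to and including its last digit / the digitless tail after it
def pvTrunc (l : List Char) : List Char := (l.reverse.dropWhile (fun c => !pvIsDigit c)).reverse
def pvNdTail (l : List Char) : List Char := (l.reverse.takeWhile (fun c => !pvIsDigit c)).reverse

theorem pvTrunc_append (l : List Char) : pvTrunc l ++ pvNdTail l = l := by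
  simp [pvTrunc, pvNdTail, ← List.reverse_append, List.takeWhile_append_dropWhile]

theorem pvNdTail_nodigit {l : List Char} {c : Char} (h : c ∈ pvNdTail l) : pvIsDigit c = false := by
  simp only [pvNdTail, List.mem_reverse] at h
  have := List.mem_takeWhile_imp h
  simpa using this

theorem pvCdg_ndTail (l : List Char) : pvCdg (pvNdTail l) = 0 := by
  simp only [pvCdg, List.length_eq_zero_iff, List.filter_eq_nil_iff]
  intro c hc
  simp [pvNdTail_nodigit hc]

theorem pvCdg_trunc (l : List Char) : pvCdg (pvTrunc l) = pvCdg l := by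
  have h1 := pvCdg_ndTail l
  have h2 : pvCdg (pvTrunc l ++ pvNdTail l) = pvCdg l := by rw [pvTrunc_append]
  simp only [pvCdg, List.filter_append, List.length_append] at *
  omega

theorem pvTrunc_ne_nil {l : List Char} (h : 0 < pvCdg l) : pvTrunc l ≠ [] := by
  intro hnil
  have := pvCdg_trunc l
  rw [hnil] at this
  simp only [pvCdg, List.filter_nil, List.length_nil] at this h
  omega

theorem pvTrunc_cons {w : List Char} (c : Char) (h : 0 < pvCdg w) :
    pvTrunc (c :: w) = c :: pvTrunc w := by
  have hne : w.reverse.dropWhile (fun c => !pvIsDigit c) ≠ [] := by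
    intro hnil
    rw [List.dropWhile_eq_nil_iff] at hnil
    have : pvCdg w = 0 := by
      simp only [pvCdg, List.length_eq_zero_iff, List.filter_eq_nil_iff]
      intro x hx
      have := hnil x (by simpa using hx)
      simpa using this
    omega
  simp only [pvTrunc, List.reverse_cons, List.dropWhile_append, List.isEmpty_iff]
  rw [if_neg hne]
  simp

theorem pvCdg_eq_zero {l : List Char} (h : pvCdg l = 0) : ∀ c ∈ l, pvIsDigit c = false := by
  simp only [pvCdg, List.length_eq_zero_iff, List.filter_eq_nil_iff] at h
  intro c hc
  simpa using h c hc

-- B's masking of a phone run, reference form: mask the first k digits, preserve the rest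
def pvMaskB (run : List Char) (mask : List Char) (k : Nat) : List Char :=
  match run with
  | [] => []
  | c :: r =>
    if ('0' ≤ c && c ≤ '9') && k > 0 then mask ++ pvMaskB r mask (k-1)
    else c :: pvMaskB r mask k

-- reference function for A: processes the remaining suffix of the text
def pvF (mask : List Char) : List Char → List Char
  | [] => []
  | c :: r =>
    if hs : pvIsStart c then
      if pvCdg (List.takeWhile pvIsPhone (c :: r)) ≥ 5 then
        pvMaskA (pvTrunc (List.takeWhile pvIsPhone (c :: r))) mask ++ pvF mask (List.drop (pvTrunc (List.takeWhile pvIsPhone (c :: r))).length (c :: r))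
      else List.takeWhile pvIsPhone (c :: r) ++ pvF mask (List.dropWhile pvIsPhone (c :: r))
    else c :: pvF mask r
termination_by t => t.length
decreasing_by
  · rename_i h5
    have h1 : pvTrunc (List.takeWhile pvIsPhone (c :: r)) ≠ [] := pvTrunc_ne_nil (by omega)
    have h2 : 0 < (pvTrunc (List.takeWhile pvIsPhone (c :: r))).length := List.length_pos_iff.mpr h1
    simp only [List.length_drop, List.length_cons]
    omega
  · have hp := pvIsPhone_of_start hs
    simp only [List.dropWhile_cons, hp, if_true, List.length_cons]
    have := List.length_dropWhile_le pvIsPhone r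
    omega
  · simp

-- run-based middle reference: both A and B are reduced to this form
def pvG (mask : List Char) : List Char → List Char
  | [] => []
  | c :: r =>
    if hp : pvIsPhone c then
      (if pvCdg (List.takeWhile pvIsPhone (c :: r)) ≥ 5 then
        pvMaskB (List.takeWhile pvIsPhone (c :: r)) mask (pvCdg (List.takeWhile pvIsPhone (c :: r)) - 4)
       else List.takeWhile pvIsPhone (c :: r)) ++
        pvG mask (List.dropWhile pvIsPhone (c :: r))
    else c :: pvG mask r
termination_by t => t.length
decreasing_by
  · simp only [List.dropWhile_cons, hp, if_true, List.length_cons]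
    have := List.length_dropWhile_le pvIsPhone r
    omega
  · simp

-- masking equivalences
theorem pvMaskAGo_eq_maskB (mask : List Char) {dc : Nat} (hdc : dc > 4) :
    ∀ (l : List Char) (cur : Nat), pvMaskAGo l mask dc cur = pvMaskB l mask (dc - 4 - cur) := by
  intro l
  induction l with
  | nil => intro cur; simp [pvMaskAGo, pvMaskB]
  | cons ch r ih =>
    intro cur
    simp only [pvMaskAGo, pvMaskB]
    by_cases hd : pvIsDigit ch
    · have hd' : ('0' ≤ ch && ch ≤ '9') = true := hd
      by_cases hc : cur + 1 ≤ dc - 4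
      · have hk : dc - 4 - cur > 0 := by omega
        have hk1 : dc - 4 - cur - 1 = dc - 4 - (cur + 1) := by omega
        simp [hd, hd', hdc, hc, hk, hk1, ih]
      · have hk : ¬ (dc - 4 - cur > 0) := by omega
        have hk1 : dc - 4 - cur = dc - 4 - (cur + 1) := by omega
        simp [hd, hd', hdc, hc, hk, ← hk1, ih]
    · have hd' : ('0' ≤ ch && ch ≤ '9') = false := by simpa [pvIsDigit] using hd
      simp [hd, hd', ih]

theorem pvMaskA_eq_maskB (mask : List Char) {l : List Char} (h : pvCdg l ≥ 5) :
    pvMaskA l mask = pvMaskB l mask (pvCdg l - 4) := by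
  have := pvMaskAGo_eq_maskB mask (dc := pvCdg l) (by omega) l 0
  simpa [pvMaskA, pvCdg] using this

theorem pvMaskB_zero (mask : List Char) (l : List Char) : pvMaskB l mask 0 = l := by
  induction l with
  | nil => simp [pvMaskB]
  | cons c r ih => simp [pvMaskB, ih]

theorem pvMaskB_append (mask : List Char) :
    ∀ (u : List Char) (k : Nat), k ≤ pvCdg u → ∀ v, pvMaskB (u ++ v) mask k = pvMaskB u mask k ++ v := by
  intro u
  induction u with
  | nil =>
    intro k hk v
    simp [pvCdg] at hk
    simp [hk, pvMaskB, pvMaskB_zero]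
  | cons c r ih =>
    intro k hk v
    by_cases hd : pvIsDigit c
    · have hd' : ('0' ≤ c && c ≤ '9') = true := hd
      rcases Nat.eq_zero_or_pos k with hk0 | hkpos
      · simp [hk0, pvMaskB, pvMaskB_zero, hd']
      · have hk' : k - 1 ≤ pvCdg r := by
          simp [pvCdg, List.filter_cons, hd] at hk ⊢
          omega
        simp [pvMaskB, hd', hkpos, ih (k-1) hk' v]
    · have hd' : ('0' ≤ c && c ≤ '9') = false := by simpa [pvIsDigit] using hd
      have hk' : k ≤ pvCdg r := by
        simp [pvCdg, List.filter_cons, hd] at hk ⊢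
        omega
      simp [pvMaskB, hd', ih k hk' v]

theorem pvStart_of_digit {c : Char} (h : pvIsDigit c = true) : pvIsStart c = true := by
  simp [pvIsStart, h]

theorem pvTakeWhile_append_all {p : Char → Bool} :
    ∀ {u : List Char}, (∀ c ∈ u, p c = true) → ∀ v, (u ++ v).takeWhile p = u ++ v.takeWhile p := by
  intro u
  induction u with
  | nil => intro _ v; simp
  | cons c u' ih =>
    intro hall v
    have hc := hall c (by simp)
    simp only [List.cons_append, List.takeWhile_cons, hc, if_true]
    rw [ih (fun x hx => hall x (by simp [hx])) v]

theorem pvDropWhile_append_all {p : Char → Bool} :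
    ∀ {u : List Char}, (∀ c ∈ u, p c = true) → ∀ v, (u ++ v).dropWhile p = v.dropWhile p := by
  intro u
  induction u with
  | nil => intro _ v; simp
  | cons c u' ih =>
    intro hall v
    have hc := hall c (by simp)
    simp only [List.cons_append, List.dropWhile_cons, hc, if_true]
    exact ih (fun x hx => hall x (by simp [hx])) v

theorem pvDropWhile_id {p : Char → Bool} {v : List Char} (h : v.takeWhile p = []) :
    v.dropWhile p = v := by
  conv_rhs => rw [← List.takeWhile_append_dropWhile (p := p) (l := v), h]
  simp

theorem pvTrunc_digit_singleton {d : Char} {w : List Char} (hd : pvIsDigit d = true)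
    (hw : pvCdg w = 0) : pvTrunc (d :: w) = [d] := by
  have hall : ∀ c ∈ w.reverse, (!pvIsDigit c) = true := by
    intro c hc
    simp [pvCdg_eq_zero hw c (by simpa using hc)]
  simp only [pvTrunc, List.reverse_cons]
  rw [pvDropWhile_append_all hall [d]]
  simp [List.dropWhile_cons, hd]

-- scanner characterisations
theorem pvScanEnd_eq (s : List Char) (i : Nat) :
    pvScanEnd s i = i + ((s.drop i).takeWhile pvIsPhone).length := by
  rw [pvScanEnd]
  by_cases h : i < s.length
  · rw [dif_pos h]
    have hd : s.drop i = s[i] :: s.drop (i+1) := List.drop_eq_getElem_cons h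
    by_cases hp : pvIsPhone s[i]
    · rw [if_pos hp, pvScanEnd_eq s (i+1), hd]
      simp only [List.takeWhile_cons, hp, if_true, List.length_cons]
      omega
    · rw [if_neg hp, hd]
      simp only [List.takeWhile_cons, hp, if_false, Bool.false_eq_true, List.length_nil]
      omega
  · rw [dif_neg h]
    have : s.drop i = [] := List.drop_eq_nil_of_le (by omega)
    simp [this]
termination_by s.length - i
decreasing_by omega

theorem pvCountLastGo_eq (s : List Char) :
    ∀ (k idx : Nat) (dc : Nat) (ldi : Int), idx + k ≤ s.length →
    pvCountLastGo s k idx dc ldi =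
      (dc + pvCdg ((s.drop idx).take k),
       if pvCdg ((s.drop idx).take k) = 0 then ldi
       else ((idx + (pvTrunc ((s.drop idx).take k)).length - 1 : Nat) : Int)) := by
  intro k
  induction k with
  | zero => intro idx dc ldi _; simp [pvCountLastGo, pvCdg]
  | succ k ih =>
    intro idx dc ldi hk
    have hidx : idx < s.length := by omega
    have hget : s.getD idx ' ' = s[idx] := List.getD_eq_getElem s ' ' hidx
    have hw : (s.drop idx).take (k+1) = s[idx] :: (s.drop (idx+1)).take k := by
      rw [List.drop_eq_getElem_cons hidx, List.take_succ_cons]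
    rw [pvCountLastGo, hget, hw]
    by_cases hd : pvIsDigit s[idx]
    · rw [if_pos hd, ih (idx+1) (dc+1) (idx : Int) (by omega)]
      have hcdg : pvCdg (s[idx] :: (s.drop (idx+1)).take k)
          = pvCdg ((s.drop (idx+1)).take k) + 1 := by
        simp [pvCdg, List.filter_cons, hd]
      by_cases h0 : pvCdg ((s.drop (idx+1)).take k) = 0
      · have htr := pvTrunc_digit_singleton hd h0
        rw [Prod.mk.injEq]
        refine ⟨by omega, ?_⟩
        rw [if_pos h0, if_neg (by omega), htr]
        simp
      · have htr := pvTrunc_cons (w := (s.drop (idx+1)).take k) s[idx] (by omega)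
        have hT : 0 < (pvTrunc ((s.drop (idx+1)).take k)).length :=
          List.length_pos_iff.mpr (pvTrunc_ne_nil (by omega))
        rw [Prod.mk.injEq]
        refine ⟨by omega, ?_⟩
        rw [if_neg h0, if_neg (by omega), htr]
        simp only [List.length_cons]
        congr 1
        omega
    · rw [if_neg hd, ih (idx+1) dc ldi (by omega)]
      have hcdg : pvCdg (s[idx] :: (s.drop (idx+1)).take k)
          = pvCdg ((s.drop (idx+1)).take k) := by
        simp [pvCdg, List.filter_cons, hd]
      by_cases h0 : pvCdg ((s.drop (idx+1)).take k) = 0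
      · rw [Prod.mk.injEq]
        refine ⟨by omega, ?_⟩
        rw [if_pos h0, if_pos (by omega)]
      · have htr := pvTrunc_cons (w := (s.drop (idx+1)).take k) s[idx] (by omega)
        have hT : 0 < (pvTrunc ((s.drop (idx+1)).take k)).length :=
          List.length_pos_iff.mpr (pvTrunc_ne_nil (by omega))
        rw [Prod.mk.injEq]
        refine ⟨by omega, ?_⟩
        rw [if_neg h0, if_neg (by omega), htr]
        simp only [List.length_cons]
        congr 1
        omega

theorem pvCountLast_eq (s : List Char) (idx fin : Nat) (dc : Nat) (ldi : Int)
    (hfin : fin ≤ s.length) :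
    pvCountLast s idx fin dc ldi =
      (dc + pvCdg ((s.drop idx).take (fin - idx)),
       if pvCdg ((s.drop idx).take (fin - idx)) = 0 then ldi
       else ((idx + (pvTrunc ((s.drop idx).take (fin - idx))).length - 1 : Nat) : Int)) := by
  rw [pvCountLast]
  by_cases h : idx ≤ fin
  · exact pvCountLastGo_eq s (fin - idx) idx dc ldi (by omega)
  · have hfi : fin - idx = 0 := by omega
    rw [hfi]
    simp [pvCountLastGo, pvCdg]

-- take of takeWhile-length is takeWhile
theorem pvTake_len_takeWhile (p : Char → Bool) (l : List Char) :
    l.take (l.takeWhile p).length = l.takeWhile p := by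
  obtain ⟨rest, hr⟩ := List.takeWhile_prefix (p := p) (l := l)
  have step : l.take (l.takeWhile p).length = (l.takeWhile p ++ rest).take (l.takeWhile p).length := by
    rw [hr]
  rw [step, List.take_left]

theorem pvDropWhile_eq_drop (p : Char → Bool) (l : List Char) :
    l.dropWhile p = l.drop (l.takeWhile p).length := by
  calc l.dropWhile p = (l.takeWhile p ++ l.dropWhile p).drop (l.takeWhile p).length := by
        rw [List.drop_left]
    _ = l.drop (l.takeWhile p).length := by rw [List.takeWhile_append_dropWhile]

theorem pvTakeWhile_dropWhile (p : Char → Bool) (l : List Char) :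
    (l.dropWhile p).takeWhile p = [] := by
  induction l with
  | nil => simp
  | cons c r ih =>
    by_cases h : p c
    · simpa [List.dropWhile_cons, h] using ih
    · simp [List.dropWhile_cons, List.takeWhile_cons, h]

-- f skips a digitless phone block literally
theorem pvF_skip (mask : List Char) :
    ∀ (u v : List Char), (∀ c ∈ u, pvIsPhone c = true ∧ pvIsDigit c = false) →
    List.takeWhile pvIsPhone v = [] → pvF mask (u ++ v) = u ++ pvF mask v := by
  intro u
  induction u with
  | nil => intro v _ _; simp
  | cons c u' ih =>
    intro v hall hv
    obtain ⟨hpc, hdc⟩ := hall c (by simp)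
    have hall' : ∀ x ∈ u', pvIsPhone x = true ∧ pvIsDigit x = false :=
      fun x hx => hall x (by simp [hx])
    have hallp : ∀ x ∈ u', pvIsPhone x = true := fun x hx => (hall' x hx).1
    rw [List.cons_append]
    by_cases hs : pvIsStart c
    · have htw : List.takeWhile pvIsPhone (c :: (u' ++ v)) = c :: u' := by
        rw [List.takeWhile_cons, if_pos hpc, pvTakeWhile_append_all hallp v, hv, List.append_nil]
      have hcdg : pvCdg (c :: u') = 0 := by
        simp only [pvCdg, List.length_eq_zero_iff, List.filter_eq_nil_iff]
        intro x hx
        rcases List.mem_cons.mp hx with rfl | hx'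
        · simp [hdc]
        · simp [(hall' x hx').2]
      have hdw : List.dropWhile pvIsPhone (c :: (u' ++ v)) = v := by
        rw [List.dropWhile_cons]
        simp only [hpc, if_true]
        rw [pvDropWhile_append_all hallp v, pvDropWhile_id hv]
      rw [pvF]
      rw [dif_pos hs]
      rw [htw]
      rw [if_neg (show ¬ pvCdg (c :: u') ≥ 5 by omega), hdw]
    · rw [pvF]
      rw [dif_neg hs]
      rw [ih v hall' hv]
      simp

theorem pvMaskB_cons_nondigit (mask : List Char) {c : Char} (r : List Char) (k : Nat)
    (hd : pvIsDigit c = false) : pvMaskB (c :: r) mask k = c :: pvMaskB r mask k := by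
  have hd' : ('0' ≤ c && c ≤ '9') = false := by simpa [pvIsDigit] using hd
  simp [pvMaskB, hd']

theorem pvG_cons_nondigit (mask : List Char) {c : Char} (r : List Char)
    (hp : pvIsPhone c = true) (hd : pvIsDigit c = false) :
    pvG mask (c :: r) = c :: pvG mask r := by
  have htw : List.takeWhile pvIsPhone (c :: r) = c :: List.takeWhile pvIsPhone r := by
    rw [List.takeWhile_cons, if_pos hp]
  have hdw : List.dropWhile pvIsPhone (c :: r) = List.dropWhile pvIsPhone r := by
    rw [List.dropWhile_cons]
    simp [hp]
  have hcdg : pvCdg (c :: List.takeWhile pvIsPhone r) = pvCdg (List.takeWhile pvIsPhone r) := by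
    simp [pvCdg, List.filter_cons, hd]
  rw [pvG, dif_pos hp, htw, hdw, hcdg]
  match r with
  | [] => simp [pvG, pvCdg]
  | e :: r' =>
    by_cases hpe : pvIsPhone e
    · rw [pvG, dif_pos hpe]
      by_cases h5 : pvCdg (List.takeWhile pvIsPhone (e :: r')) ≥ 5
      · rw [if_pos h5, if_pos h5, pvMaskB_cons_nondigit mask _ _ hd]
        simp
      · rw [if_neg h5, if_neg h5]
        simp
    · have htw' : List.takeWhile pvIsPhone (e :: r') = [] := by
        rw [List.takeWhile_cons, if_neg (by simpa using hpe)]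
      have hdw' : List.dropWhile pvIsPhone (e :: r') = e :: r' := by
        rw [List.dropWhile_cons]
        simp [hpe]
      rw [htw', hdw']
      simp only [pvCdg, List.filter_nil, List.length_nil]
      rw [if_neg (by omega)]
      simp

theorem pvF_eq_pvG (mask : List Char) (t : List Char) : pvF mask t = pvG mask t := by
  match t with
  | [] => rw [pvF, pvG]
  | c :: r =>
    by_cases hs : pvIsStart c
    · have hpc : pvIsPhone c = true := pvIsPhone_of_start hs
      by_cases h5 : pvCdg (List.takeWhile pvIsPhone (c :: r)) ≥ 5
      · rw [pvF, dif_pos hs, if_pos h5, pvG, dif_pos hpc, if_pos h5]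
        set run := List.takeWhile pvIsPhone (c :: r) with hrun
        have hsplit : pvTrunc run ++ pvNdTail run = run := pvTrunc_append run
        have hcdgc : pvCdg (pvTrunc run) = pvCdg run := pvCdg_trunc run
        have ht : c :: r = run ++ List.dropWhile pvIsPhone (c :: r) :=
          (List.takeWhile_append_dropWhile (p := pvIsPhone) (l := c :: r)).symm
        have hdropt : List.drop (pvTrunc run).length (c :: r)
            = pvNdTail run ++ List.dropWhile pvIsPhone (c :: r) := by
          calc List.drop (pvTrunc run).length (c :: r)
              = List.drop (pvTrunc run).length
                  (pvTrunc run ++ (pvNdTail run ++ List.dropWhile pvIsPhone (c :: r))) := by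
                rw [← List.append_assoc, hsplit, ← ht]
            _ = pvNdTail run ++ List.dropWhile pvIsPhone (c :: r) := List.drop_left
        have hmask : pvMaskB run mask (pvCdg run - 4)
            = pvMaskA (pvTrunc run) mask ++ pvNdTail run := by
          calc pvMaskB run mask (pvCdg run - 4)
              = pvMaskB (pvTrunc run ++ pvNdTail run) mask (pvCdg run - 4) := by rw [hsplit]
            _ = pvMaskB (pvTrunc run) mask (pvCdg run - 4) ++ pvNdTail run :=
              pvMaskB_append mask _ _ (by omega) _
            _ = pvMaskA (pvTrunc run) mask ++ pvNdTail run := by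
              rw [pvMaskA_eq_maskB mask (show pvCdg (pvTrunc run) ≥ 5 by omega), hcdgc]
        have hskip : pvF mask (pvNdTail run ++ List.dropWhile pvIsPhone (c :: r))
            = pvNdTail run ++ pvF mask (List.dropWhile pvIsPhone (c :: r)) := by
          apply pvF_skip
          · intro x hx
            refine ⟨?_, pvNdTail_nodigit hx⟩
            have hxrun : x ∈ run := by
              rw [← hsplit]
              exact List.mem_append_right _ hx
            rw [hrun] at hxrun
            exact List.mem_takeWhile_imp hxrun
          · exact pvTakeWhile_dropWhile _ _
        have hrec : pvF mask (List.dropWhile pvIsPhone (c :: r))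
            = pvG mask (List.dropWhile pvIsPhone (c :: r)) := pvF_eq_pvG mask _
        rw [hdropt, hskip, hrec, hmask, List.append_assoc]
      · rw [pvF, dif_pos hs, if_neg h5, pvG, dif_pos hpc, if_neg h5,
            pvF_eq_pvG mask (List.dropWhile pvIsPhone (c :: r))]
    · by_cases hp : pvIsPhone c
      · have hd : pvIsDigit c = false := by
          cases hdd : pvIsDigit c
          · rfl
          · exact absurd (pvStart_of_digit hdd) (by simpa using hs)
        rw [pvF, dif_neg hs, pvG_cons_nondigit mask r hp hd, pvF_eq_pvG mask r]
      · rw [pvF, dif_neg hs, pvG, dif_neg hp, pvF_eq_pvG mask r]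
termination_by t.length
decreasing_by
  · have hlen := List.length_dropWhile_le pvIsPhone r
    simp only [List.dropWhile_cons, hpc, if_true, List.length_cons]
    omega
  · have hlen := List.length_dropWhile_le pvIsPhone r
    simp only [List.dropWhile_cons, hpc, if_true, List.length_cons]
    omega
  · simp
  · simp

theorem pvF_drop_start (s mask : List Char) (i : Nat) (h : i < s.length)
    (hs : pvIsStart s[i] = true) (h5 : pvCdg ((s.drop i).takeWhile pvIsPhone) ≥ 5) :
    pvF mask (s.drop i) =
      pvMaskA (pvTrunc ((s.drop i).takeWhile pvIsPhone)) mask ++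
        pvF mask ((s.drop i).drop (pvTrunc ((s.drop i).takeWhile pvIsPhone)).length) := by
  have hd : s.drop i = s[i] :: s.drop (i+1) := List.drop_eq_getElem_cons h
  conv_lhs => rw [hd]
  rw [pvF, dif_pos hs, ← hd, if_pos h5]

theorem pvF_drop_start_small (s mask : List Char) (i : Nat) (h : i < s.length)
    (hs : pvIsStart s[i] = true) (h5 : ¬ pvCdg ((s.drop i).takeWhile pvIsPhone) ≥ 5) :
    pvF mask (s.drop i) =
      (s.drop i).takeWhile pvIsPhone ++ pvF mask ((s.drop i).dropWhile pvIsPhone) := by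
  have hd : s.drop i = s[i] :: s.drop (i+1) := List.drop_eq_getElem_cons h
  conv_lhs => rw [hd]
  rw [pvF, dif_pos hs, ← hd, if_neg h5]

theorem pvF_drop_non (s mask : List Char) (i : Nat) (h : i < s.length)
    (hs : ¬ pvIsStart s[i] = true) :
    pvF mask (s.drop i) = s[i] :: pvF mask (s.drop (i+1)) := by
  have hd : s.drop i = s[i] :: s.drop (i+1) := List.drop_eq_getElem_cons h
  conv_lhs => rw [hd]
  rw [pvF, dif_neg hs]

theorem pvLoopA_eq (s mask : List Char) :
    ∀ (fuel i last : Nat) (out : List Char), last ≤ i → s.length - i ≤ fuel →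
    pvLoopAGo fuel s mask i last out
      = out ++ (s.drop last).take (i - last) ++ pvF mask (s.drop i) := by
  intro fuel
  induction fuel with
  | zero =>
    intro i last out hl hf
    have hnil : s.drop i = [] := List.drop_eq_nil_of_le (by omega)
    have htake : List.take (i - last) (List.drop last s) = List.drop last s :=
      List.take_of_length_le (by simp [List.length_drop]; omega)
    rw [pvLoopAGo, hnil, pvF, htake]
    simp
  | succ n ih =>
    intro i last out hl hf
    rw [pvLoopAGo]
    by_cases h : i < s.length
    · rw [dif_pos h]
      by_cases hs : pvIsStart s[i]
      · rw [if_pos hs]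
        have hp' : pvIsPhone s[i] = true := pvIsPhone_of_start hs
        have hrun_cons : (s.drop i).takeWhile pvIsPhone
            = s[i] :: ((s.drop (i+1)).takeWhile pvIsPhone) := by
          rw [List.drop_eq_getElem_cons h, List.takeWhile_cons, if_pos hp']
        have hLpos : 0 < ((s.drop i).takeWhile pvIsPhone).length := by
          rw [hrun_cons]; simp
        have hLle : ((s.drop i).takeWhile pvIsPhone).length ≤ s.length - i := by
          have := (List.takeWhile_prefix (p := pvIsPhone) (l := s.drop i)).length_le
          simpa using this
        have he : pvScanEnd s i = i + ((s.drop i).takeWhile pvIsPhone).length := pvScanEnd_eq s i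
        have hfin : pvScanEnd s i ≤ s.length := by omega
        show (if (pvCountLast s i (pvScanEnd s i) 0 (-1)).2 ≠ -1 ∧
                (pvCountLast s i (pvScanEnd s i) 0 (-1)).1 ≥ 5 then
            pvLoopAGo n s mask ((pvCountLast s i (pvScanEnd s i) 0 (-1)).2 + 1).toNat
              ((pvCountLast s i (pvScanEnd s i) 0 (-1)).2 + 1).toNat
              (out ++ List.take (i - last) (List.drop last s) ++
                pvMaskA (List.take (((pvCountLast s i (pvScanEnd s i) 0 (-1)).2 + 1).toNat - i)
                  (List.drop i s)) mask)
          else pvLoopAGo n s mask (pvScanEnd s i) last out) =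
          out ++ List.take (i - last) (List.drop last s) ++ pvF mask (List.drop i s)
        rw [pvCountLast_eq s i (pvScanEnd s i) 0 (-1) hfin]
        have hwin : List.take (pvScanEnd s i - i) (List.drop i s)
            = (s.drop i).takeWhile pvIsPhone := by
          rw [he]
          have hx : i + ((s.drop i).takeWhile pvIsPhone).length - i
              = ((s.drop i).takeWhile pvIsPhone).length := by omega
          rw [hx, pvTake_len_takeWhile]
        rw [hwin]
        by_cases h5 : pvCdg ((s.drop i).takeWhile pvIsPhone) ≥ 5
        · have h0 : ¬ pvCdg ((s.drop i).takeWhile pvIsPhone) = 0 := by omega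
          have hT : 0 < (pvTrunc ((s.drop i).takeWhile pvIsPhone)).length :=
            List.length_pos_iff.mpr (pvTrunc_ne_nil (by omega))
          rw [if_neg h0]
          have hcond : ((0 + pvCdg ((s.drop i).takeWhile pvIsPhone),
              ((i + (pvTrunc ((s.drop i).takeWhile pvIsPhone)).length - 1 : Nat) : Int)).2 ≠ -1 ∧
              (0 + pvCdg ((s.drop i).takeWhile pvIsPhone),
              ((i + (pvTrunc ((s.drop i).takeWhile pvIsPhone)).length - 1 : Nat) : Int)).1 ≥ 5) := by
            refine ⟨?_, ?_⟩
            · dsimp only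
              omega
            · dsimp only
              omega
          rw [if_pos hcond]
          dsimp only
          have hce : (((i + (pvTrunc ((s.drop i).takeWhile pvIsPhone)).length - 1 : Nat) : Int)
              + 1).toNat = i + (pvTrunc ((s.drop i).takeWhile pvIsPhone)).length := by omega
          rw [hce]
          have hconcat : pvTrunc ((s.drop i).takeWhile pvIsPhone) ++
              (pvNdTail ((s.drop i).takeWhile pvIsPhone) ++
                List.dropWhile pvIsPhone (List.drop i s)) = List.drop i s := by
            rw [← List.append_assoc, pvTrunc_append, List.takeWhile_append_dropWhile]
          have hcand : List.take (i + (pvTrunc ((s.drop i).takeWhile pvIsPhone)).length - i)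
              (List.drop i s) = pvTrunc ((s.drop i).takeWhile pvIsPhone) := by
            have hx : i + (pvTrunc ((s.drop i).takeWhile pvIsPhone)).length - i
                = (pvTrunc ((s.drop i).takeWhile pvIsPhone)).length := by omega
            rw [hx]
            calc List.take (pvTrunc ((s.drop i).takeWhile pvIsPhone)).length (List.drop i s)
                = List.take (pvTrunc ((s.drop i).takeWhile pvIsPhone)).length
                    (pvTrunc ((s.drop i).takeWhile pvIsPhone) ++
                      (pvNdTail ((s.drop i).takeWhile pvIsPhone) ++
                        List.dropWhile pvIsPhone (List.drop i s))) := by rw [hconcat]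
              _ = pvTrunc ((s.drop i).takeWhile pvIsPhone) := List.take_left
          rw [hcand]
          rw [ih (i + (pvTrunc ((s.drop i).takeWhile pvIsPhone)).length)
                (i + (pvTrunc ((s.drop i).takeWhile pvIsPhone)).length) _ (le_refl _) (by omega)]
          rw [pvF_drop_start s mask i h hs h5]
          have hdd : (List.drop i s).drop (pvTrunc ((s.drop i).takeWhile pvIsPhone)).length
              = List.drop (i + (pvTrunc ((s.drop i).takeWhile pvIsPhone)).length) s := by
            rw [List.drop_drop]
            all_goals congr 1
            all_goals omega
          rw [hdd]
          simp [List.append_assoc]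
        · rw [if_neg (by
                rintro ⟨hne, hge⟩
                by_cases h0 : pvCdg ((s.drop i).takeWhile pvIsPhone) = 0
                · simp [h0] at hne
                · dsimp only at hge
                  omega)]
          rw [ih (pvScanEnd s i) last out (by omega) (by omega)]
          rw [pvF_drop_start_small s mask i h hs h5]
          have hsplitwin : List.take (pvScanEnd s i - last) (List.drop last s)
              = List.take (i - last) (List.drop last s) ++ (s.drop i).takeWhile pvIsPhone := by
            rw [he]
            have hx : i + ((s.drop i).takeWhile pvIsPhone).length - last
                = (i - last) + ((s.drop i).takeWhile pvIsPhone).length := by omega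
            rw [hx, List.take_add]
            congr 1
            rw [List.drop_drop]
            have hy : last + (i - last) = i := by omega
            rw [hy, pvTake_len_takeWhile]
          rw [hsplitwin]
          have hdw : List.dropWhile pvIsPhone (List.drop i s)
              = List.drop (pvScanEnd s i) s := by
            rw [pvDropWhile_eq_drop, List.drop_drop, he]
            all_goals congr 1
            all_goals omega
          rw [hdw]
          simp [List.append_assoc]
      · rw [if_neg hs]
        rw [ih (i+1) last out (by omega) (by omega)]
        rw [pvF_drop_non s mask i h hs]
        have hsucc : List.take (i + 1 - last) (List.drop last s)
            = List.take (i - last) (List.drop last s) ++ [s[i]] := by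
          have hx : i + 1 - last = (i - last) + 1 := by omega
          rw [hx, List.take_succ]
          congr 1
          rw [List.getElem?_drop]
          have hy : last + (i - last) = i := by omega
          rw [hy, List.getElem?_eq_getElem h]
          rfl
        rw [hsucc]
        simp [List.append_assoc]
    · rw [dif_neg h]
      have hnil : s.drop i = [] := List.drop_eq_nil_of_le (by omega)
      have htake : List.take (i - last) (List.drop last s) = List.drop last s :=
        List.take_of_length_le (by simp [List.length_drop]; omega)
      rw [hnil, pvF, htake]
      simp

-- ===== B-side lemmas: the right-to-left pass equals pvG =====

-- the counter threading of pvRevGo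
def pvKA : List Char → Nat → Nat
  | [], k => k
  | c :: r, k =>
    if pvIsDigit c then pvKA r (k+1)
    else if pvIsPhone c then pvKA r k
    else pvKA r 0

theorem pvPhoneCond (c : Char) (hd : pvIsDigit c = false) :
    (c == ' ' || c == '-' || c == '(' || c == ')' || c == '+') = pvIsPhone c := by
  simp [pvIsPhone, hd]

theorem pvRevGo_cons (mask : List Char) (c : Char) (r : List Char) (k : Nat) :
    pvRevGo mask (c :: r) k =
      (if pvIsDigit c then (if k ≥ 4 then mask else [c]) else [c]) ::
        pvRevGo mask r (if pvIsDigit c then k+1 else if pvIsPhone c then k else 0) := by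
  by_cases hd : pvIsDigit c
  · have hd' : ('0' ≤ c && c ≤ '9') = true := hd
    simp [pvRevGo, hd, hd']
  · have hd' : ('0' ≤ c && c ≤ '9') = false := by simpa [pvIsDigit] using hd
    by_cases hp : pvIsPhone c
    · simp [pvRevGo, hd, hd', hp, pvPhoneCond c hd']
    · have := pvPhoneCond c hd'
      simp [pvRevGo, hd, hd', hp, this]

theorem pvRevGo_append (mask : List Char) :
    ∀ (a b : List Char) (k : Nat),
      pvRevGo mask (a ++ b) k = pvRevGo mask a k ++ pvRevGo mask b (pvKA a k) := by
  intro a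
  induction a with
  | nil => intro b k; simp [pvRevGo, pvKA]
  | cons c r ih =>
    intro b k
    rw [List.cons_append, pvRevGo_cons, pvRevGo_cons, pvKA]
    by_cases hd : pvIsDigit c
    · simp [hd, ih]
    · by_cases hp : pvIsPhone c
      · simp [hd, hp, ih]
      · simp [hd, hp, ih]

theorem pvKA_allphone :
    ∀ {l : List Char}, (∀ c ∈ l, pvIsPhone c = true) → ∀ k, pvKA l k = k + pvCdg l := by
  intro l
  induction l with
  | nil => intro _ k; simp [pvKA, pvCdg]
  | cons c r ih =>
    intro hall k
    have hp := hall c (by simp)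
    have hall' : ∀ x ∈ r, pvIsPhone x = true := fun x hx => hall x (by simp [hx])
    rw [pvKA]
    by_cases hd : pvIsDigit c
    · rw [if_pos hd, ih hall' (k+1)]
      simp [pvCdg, List.filter_cons, hd]
      omega
    · rw [if_neg hd, if_pos hp, ih hall' k]
      simp [pvCdg, List.filter_cons, hd]

theorem pvKA_snoc_nonphone (a : List Char) {d : Char} (hd : ¬ pvIsPhone d = true) (k : Nat) :
    pvKA (a ++ [d]) k = 0 := by
  induction a generalizing k with
  | nil =>
    have hdd : pvIsDigit d = false := by
      cases h : pvIsDigit d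
      · rfl
      · exact absurd (by simp [pvIsPhone, h]) hd
    simp [pvKA, hdd, hd]
  | cons c r ih =>
    rw [List.cons_append, pvKA]
    split
    · exact ih _
    · split
      · exact ih _
      · exact ih _

theorem pvCdg_reverse (l : List Char) : pvCdg l.reverse = pvCdg l := by
  simp [pvCdg, List.filter_reverse]

-- core lemma: on an all-phone run, the backward pass with counter k
-- produces exactly 'mask the first (digits + k - 4) digits'
theorem pvRev_run (mask : List Char) :
    ∀ {l : List Char}, (∀ c ∈ l, pvIsPhone c = true) → ∀ k,
      (pvRevGo mask l.reverse k).reverse.flatten = pvMaskB l mask (pvCdg l + k - 4) := by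
  intro l
  induction l with
  | nil => intro _ k; simp [pvRevGo, pvMaskB]
  | cons c r ih =>
    intro hall k
    have hp := hall c (by simp)
    have hall' : ∀ x ∈ r, pvIsPhone x = true := fun x hx => hall x (by simp [hx])
    have hKA : pvKA r.reverse k = k + pvCdg r := by
      rw [pvKA_allphone (fun x hx => hall' x (by simpa using hx)) k, pvCdg_reverse]
    rw [List.reverse_cons, pvRevGo_append, hKA, pvRevGo_cons]
    have hflat : ∀ (x : List (List Char)) (y : List Char) (z : List (List Char)),
        (x ++ y :: z).reverse.flatten = z.reverse.flatten ++ y ++ x.reverse.flatten := by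
      intro x y z
      simp [List.reverse_append, List.flatten_append, List.append_assoc]
    rw [hflat]
    simp only [pvRevGo, List.reverse_nil, List.flatten_nil, List.nil_append]
    rw [ih hall' k]
    by_cases hd : pvIsDigit c
    · have hd' : ('0' ≤ c && c ≤ '9') = true := hd
      have hcdg : pvCdg (c :: r) = pvCdg r + 1 := by
        simp [pvCdg, List.filter_cons, hd]
      rw [hcdg, if_pos hd]
      by_cases h4 : k + pvCdg r ≥ 4
      · have hpos : (pvCdg r + 1 + k - 4) > 0 := by omega
        have heq : pvCdg r + 1 + k - 4 - 1 = pvCdg r + k - 4 := by omega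
        rw [if_pos h4, pvMaskB, if_pos (by simp [hd', hpos]), heq]
      · have hz : pvCdg r + 1 + k - 4 = 0 := by omega
        have hz2 : pvCdg r + k - 4 = 0 := by omega
        rw [if_neg h4, hz, pvMaskB, if_neg (by simp), ← hz2]
        simp
    · have hcdg : pvCdg (c :: r) = pvCdg r := by
        simp [pvCdg, List.filter_cons, hd]
      rw [hcdg, if_neg hd, pvMaskB_cons_nondigit mask r _ (by simpa using hd)]
      have : pvCdg r + k = k + pvCdg r := by omega
      rw [this]
      simp

theorem pvRev_eq_pvG (mask : List Char) (s : List Char) :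
    (pvRevGo mask s.reverse 0).reverse.flatten = pvG mask s := by
  match s with
  | [] => simp [pvRevGo, pvG]
  | c :: r =>
    by_cases hp : pvIsPhone c
    · have hsplit : c :: r = List.takeWhile pvIsPhone (c :: r) ++ List.dropWhile pvIsPhone (c :: r) :=
        (List.takeWhile_append_dropWhile (p := pvIsPhone) (l := c :: r)).symm
      set run := List.takeWhile pvIsPhone (c :: r) with hrun
      set rest := List.dropWhile pvIsPhone (c :: r) with hrest
      have hallrun : ∀ x ∈ run, pvIsPhone x = true := fun x hx => List.mem_takeWhile_imp hx
      have hKA0 : pvKA rest.reverse 0 = 0 := by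
        match hr : rest with
        | [] => simp [pvKA]
        | d :: rest' =>
          have hd : ¬ pvIsPhone d = true := by
            have h2 := List.head?_dropWhile_not pvIsPhone (c :: r)
            rw [← hrest] at h2
            simpa using h2
          rw [List.reverse_cons]
          exact pvKA_snoc_nonphone _ hd 0
      have hrev : (c :: r).reverse = rest.reverse ++ run.reverse := by
        conv_lhs => rw [hsplit]
        rw [List.reverse_append]
      rw [hrev, pvRevGo_append, hKA0]
      have hflat : ∀ (x y : List (List Char)),
          (x ++ y).reverse.flatten = y.reverse.flatten ++ x.reverse.flatten := by
        intro x y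
        simp [List.reverse_append, List.flatten_append]
      rw [hflat, pvRev_run mask hallrun 0, pvRev_eq_pvG mask rest]
      have hGm : pvG mask (c :: r) =
          (if pvCdg run ≥ 5 then pvMaskB run mask (pvCdg run - 4) else run) ++ pvG mask rest := by
        rw [pvG, dif_pos hp]
      rw [hGm]
      congr 1
      by_cases h5 : pvCdg run ≥ 5
      · rw [if_pos h5, Nat.add_zero]
      · rw [if_neg h5]
        have hz : pvCdg run + 0 - 4 = 0 := by omega
        rw [hz, pvMaskB_zero]
    · have hd : pvIsDigit c = false := by
        cases h : pvIsDigit c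
        · rfl
        · exact absurd (by simp [pvIsPhone, h]) hp
      rw [List.reverse_cons, pvRevGo_append, pvRevGo_cons, hd]
      simp only [Bool.false_eq_true, if_false, hp, pvRevGo]
      have hflat : ∀ (x : List (List Char)) (y : List Char),
          (x ++ [y]).reverse.flatten = y ++ x.reverse.flatten := by
        intro x y
        simp [List.reverse_append]
      rw [hflat, pvRev_eq_pvG mask r, pvG, dif_neg hp]
      simp
termination_by s.length
decreasing_by
  · have h1 : 0 < run.length := by
      rw [hrun, List.takeWhile_cons, if_pos hp]
      simp
    have h2 : run.length + rest.length = (c :: r).length := by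
      rw [← List.length_append, ← hsplit]
    simp only [List.length_cons, ← hrest] at h2 ⊢
    omega
  · simp

-- ===== VERDICT (by name: the statement is the Claim_ definition above) =====
theorem mask_phones_in_text_py_spec : Claim_equal_mask_phones_in_text_py := by
  intro input_text mask_char _
  unfold Spec_mask_phones_in_text_py mask_phones_in_text_py mask_phones_in_text_py_alt
  rw [pvLoopA_eq input_text.toList mask_char.toList input_text.toList.length 0 0 []
        (le_refl 0) (by omega),
      pvRev_eq_pvG]
  simp [pvF_eq_pvG]
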